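-- pv_equiv track=rewrite | github.com/ogasimli/veritas-ai | backend/agents/veritas_ai_agent/sub_agents/numeric_validation/sub_agents/in_table_pipeline/sub_agents/vertical_horizontal_check/utils.py | chunk_tables
-- ===== SOURCE A (Python) =====
-- import math
-- from typing import Any
--
-- def chunk_tables(tables: list[Any], max_size: int = 15) -> list[list[Any]]:
--     """Split tables into evenly distributed batches of at most max_size.
--
--     Args:
--         tables: List of tables to split.
--         max_size: Maximum number of tables per batch.
--
--     Returns:
--         List of batches, where each batch is a list of tables.
--     """
--     n = len(tables)
--     if n == 0:
--         return []
--
--     # Calculate number of batches needed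
--     # e.g., if n=16, max_size=15 -> num_batches=2
--     num_batches = math.ceil(n / max_size)
--
--     # Distribute tables evenly across batches
--     # divmod(16, 2) -> base_size=8, remainder=0 (8+8)
--     # divmod(31, 2) -> base_size=15, remainder=1 (16+15)
--     base_size, remainder = divmod(n, num_batches)
--     batches = []
--
--     start = 0
--     for i in range(num_batches):
--         # Add 1 extra item to the first 'remainder' batches to distribute remainder
--         size = base_size + (1 if i < remainder else 0)
--         batches.append(tables[start : start + size])
--         start += size
--
--     return batches
-- ===== SOURCE B (Python) =====
-- def chunk_tables(tables, max_size=15):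
--     """Split tables into evenly distributed batches of at most max_size.
--
--     Greedy recursive peel: with k = ceil(n / max_size) batches needed, take
--     the first ceil(n / k) tables as the first batch and split the remaining
--     suffix into k - 1 batches, recomputing the ceiling at each step (no
--     divmod base/remainder, no running offset).
--     """
--     if not tables:
--         return []
--     return _split(tables, -(-len(tables) // max_size))
--
--
-- def _split(tables, k):
--     """Split tables into k balanced batches, larger batches first."""
--     if k <= 1:
--         return [tables]
--     size = -(-len(tables) // k)  # ceil(len/k): first batch gets the extra
--     return [tables[:size]] + _split(tables[size:], k - 1)
-- ===== Notes on version B (the rewrite author's own statement) =====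
-- stated objective: alternative
-- what changed: Replaces A's one-shot divmod(base,remainder) sizing and running-offset loop by a recursive greedy peel: take the first ceil(len/k) tables as a batch and split the remaining suffix into k-1 batches, recomputing the ceiling division at each step.
-- outside the precondition, e.g. on chunk_tables([1, 2], -2): A returns [], B returns [[1, 2]]; on chunk_tables([1], -5): A raises ZeroDivisionError, B returns [[1]]
import Mathlib
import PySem

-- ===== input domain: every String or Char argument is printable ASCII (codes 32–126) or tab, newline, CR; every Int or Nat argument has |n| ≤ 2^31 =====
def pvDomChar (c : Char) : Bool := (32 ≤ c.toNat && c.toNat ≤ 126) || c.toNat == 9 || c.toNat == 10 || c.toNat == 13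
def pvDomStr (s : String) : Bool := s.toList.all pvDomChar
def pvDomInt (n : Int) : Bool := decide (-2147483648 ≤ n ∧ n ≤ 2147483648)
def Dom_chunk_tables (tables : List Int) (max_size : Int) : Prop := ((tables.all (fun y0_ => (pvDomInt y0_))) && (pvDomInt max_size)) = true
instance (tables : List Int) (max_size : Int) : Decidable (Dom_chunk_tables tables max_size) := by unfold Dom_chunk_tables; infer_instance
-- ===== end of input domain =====

-- B replaces A's divmod base/remainder sizing and running-offset loop by a recursive
-- greedy peel (take the first ceil(len/k) tables, split the suffix into k-1 batches),
-- recomputing the ceiling division each step ('alternative').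

-- ===== PORT A =====
def chunk_tables (tables : List Int) (max_size : Int) : List (List Int) :=
  let n : Int := tables.length
  if n = 0 then []
  else
    -- math.ceil(n / max_size) ported as integer ceiling division -((-n) // max_size);
    -- exact on Dom (|n| ≤ 2^31 < 2^52, so the float ceil equals the integer ceil)
    let num_batches : Int := -(PySem.Int.floordiv (-n) max_size)
    let base_size : Int := PySem.Int.floordiv n num_batches
    let remainder : Int := PySem.Int.mod n num_batches
    ((PySem.List.pyRange 0 num_batches 1).foldl
      (fun (st : List (List Int) × Int) i =>
        let size := base_size + (if i < remainder then (1 : Int) else 0)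
        (st.1 ++ [PySem.List.slice tables (some st.2) (some (st.2 + size))], st.2 + size))
      ([], 0)).1

-- ===== PORT B =====
-- port of Source B's helper _split: peel off the first ceil(len/k) tables, recurse on the suffix
def pvSplitB (tables : List Int) (k : Int) : List (List Int) :=
  if k ≤ 1 then [tables]
  else
    let size : Int := -(PySem.Int.floordiv (-(tables.length : Int)) k)
    [PySem.List.slice tables none (some size)]
      ++ pvSplitB (PySem.List.slice tables (some size) none) (k - 1)
termination_by k.toNat
decreasing_by omega

def chunk_tables_alt (tables : List Int) (max_size : Int) : List (List Int) :=
  if tables = [] then []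
  else pvSplitB tables (-(PySem.Int.floordiv (-(tables.length : Int)) max_size))

-- ===== PRECONDITION & SPEC =====
-- Pre_ restricts to positive max_size (plus the trivial empty list), the function's
-- natural domain: for non-positive max_size A raises ZeroDivisionError on part of the
-- inputs and on the rest returns an accidental [] from a negative ceiling, discarding
-- the tables.
def Pre_chunk_tables (tables : List Int) (max_size : Int) : Prop :=
  0 < max_size ∨ tables = []
instance (tables : List Int) (max_size : Int) : Decidable (Pre_chunk_tables tables max_size) := by
  unfold Pre_chunk_tables; infer_instance

def pvWitness_chunk_tables : List Int × Int := ([1, 2, 3, 4, 5], 2)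

def Spec_chunk_tables (tables : List Int) (max_size : Int) (out : List (List Int)) : Prop := out = chunk_tables_alt tables max_size
instance (tables : List Int) (max_size : Int) (out : List (List Int)) : Decidable (Spec_chunk_tables tables max_size out) := by unfold Spec_chunk_tables; infer_instance

-- ===== CLAIM (what is proved, stated in full; the proofs are below) =====
def Claim_equal_chunk_tables : Prop := ∀ (tables : List Int) (max_size : Int), Dom_chunk_tables tables max_size → Pre_chunk_tables tables max_size → Spec_chunk_tables tables max_size (chunk_tables tables max_size)

-- ===== LEMMAS AND PROOFS =====

-- the boundary of batch i in the balanced partition with quotient base, remainder rem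
def pvCut (base rem i : Int) : Int := i * base + min i rem

lemma pvCut_succ (base rem i : Int) :
    pvCut base rem i + (base + (if i < rem then (1 : Int) else 0)) = pvCut base rem (i + 1) := by
  unfold pvCut
  split_ifs with h
  · have h1 : min i rem = i := min_eq_left (by omega)
    have h2 : min (i + 1) rem = i + 1 := min_eq_left (by omega)
    rw [h1, h2]; ring
  · have h1 : min i rem = rem := min_eq_right (by omega)
    have h2 : min (i + 1) rem = rem := min_eq_right (by omega)
    rw [h1, h2]; ring

-- A's loop with start = pvCut k appends one slice per index, keeping start at the cut
lemma pvLoopA (tables : List Int) (base rem : Int) :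
    ∀ (fuel : Nat) (nb k : Int) (acc : List (List Int)), nb ≤ k + fuel →
    ((PySem.List.pyRange k nb 1).foldl
      (fun (st : List (List Int) × Int) i =>
        let size := base + (if i < rem then (1 : Int) else 0)
        (st.1 ++ [PySem.List.slice tables (some st.2) (some (st.2 + size))], st.2 + size))
      (acc, pvCut base rem k)).1
    = acc ++ (PySem.List.pyRange k nb 1).map
        (fun i => PySem.List.slice tables (some (pvCut base rem i)) (some (pvCut base rem (i + 1)))) := by
  intro fuel
  induction fuel with
  | zero =>
    intro nb k acc h
    rw [PySem.List.pyRange_one_eq_nil (by exact_mod_cast by omega)]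
    simp
  | succ f ih =>
    intro nb k acc h
    by_cases hk : nb ≤ k
    · rw [PySem.List.pyRange_one_eq_nil hk]; simp
    · rw [PySem.List.pyRange_one_cons (by omega)]
      simp only [List.foldl_cons, List.map_cons]
      rw [pvCut_succ]
      rw [ih nb (k + 1) (acc ++ [PySem.List.slice tables (some (pvCut base rem k)) (some (pvCut base rem (k + 1)))]) (by push_cast at h ⊢; omega)]
      simp

-- shifting a range by one
lemma pvRangeShift : ∀ (fuel : Nat) (a b : Int), b ≤ a + fuel →
    PySem.List.pyRange (a + 1) (b + 1) 1 = (PySem.List.pyRange a b 1).map (fun i => i + 1) := by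
  intro fuel
  induction fuel with
  | zero =>
    intro a b h
    rw [PySem.List.pyRange_one_eq_nil (show b + 1 ≤ a + 1 by omega),
      PySem.List.pyRange_one_eq_nil (show b ≤ a by push_cast at h; omega)]
    simp
  | succ f ih =>
    intro a b h
    by_cases hk : b ≤ a
    · rw [PySem.List.pyRange_one_eq_nil (show b + 1 ≤ a + 1 by omega),
        PySem.List.pyRange_one_eq_nil hk]
      simp
    · rw [PySem.List.pyRange_one_cons (show a + 1 < b + 1 by omega),
        PySem.List.pyRange_one_cons (show a < b by omega)]
      rw [ih (a + 1) b (by push_cast at h ⊢; omega)]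
      simp

-- slicing a suffix is slicing the original with shifted bounds
lemma pvSliceShift (l : List Int) (s a b : Int) (hs : 0 ≤ s) (ha : 0 ≤ a) (hb : 0 ≤ b) :
    PySem.List.slice (l.drop s.toNat) (some a) (some b)
      = PySem.List.slice l (some (a + s)) (some (b + s)) := by
  rw [PySem.List.slice_toNat _ ha hb, PySem.List.slice_toNat _ (by omega) (by omega)]
  rw [List.drop_drop]
  congr 1
  · omega
  · congr 1; omega

-- B's recursive peel produces exactly the slices between consecutive balanced cuts
lemma pvSplitB_eq : ∀ (fuel : Nat) (l : List Int) (k : Int), 1 ≤ k → k ≤ fuel →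
    pvSplitB l k = (PySem.List.pyRange 0 k 1).map
      (fun i => PySem.List.slice l
        (some (pvCut (PySem.Int.floordiv l.length k) (PySem.Int.mod l.length k) i))
        (some (pvCut (PySem.Int.floordiv l.length k) (PySem.Int.mod l.length k) (i + 1)))) := by
  intro fuel
  induction fuel with
  | zero => intro l k h1 h2; omega
  | succ f ih =>
    intro l k h1 h2
    have hkpos : (0 : Int) < k := by omega
    have hn0 : (0 : Int) ≤ (l.length : Int) := by positivity
    set q : Int := (l.length : Int) / k with hqdef
    set r : Int := (l.length : Int) % k with hrdef
    have hbase : PySem.Int.floordiv (l.length : Int) k = q :=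
      PySem.Int.floordiv_eq_ediv_of_pos hkpos
    have hrem : PySem.Int.mod (l.length : Int) k = r :=
      PySem.Int.mod_eq_emod_of_pos hkpos
    have hr0 : 0 ≤ r := Int.emod_nonneg _ (by omega)
    have hrk : r < k := Int.emod_lt_of_pos _ hkpos
    have hdm : k * q + r = (l.length : Int) := Int.mul_ediv_add_emod _ k
    have hq0 : 0 ≤ q := Int.ediv_nonneg hn0 (by omega)
    by_cases hk1 : k = 1
    · subst hk1
      rw [pvSplitB]
      simp only [le_refl, if_pos]
      rw [PySem.List.pyRange_one_cons (show (0:Int) < 1 by omega),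
        PySem.List.pyRange_one_eq_nil (show (1:Int) ≤ 0 + 1 by omega)]
      simp only [List.map_cons, List.map_nil]
      rw [hbase, hrem]
      have hr1 : r = 0 := by omega
      have hq1 : q = (l.length : Int) := by omega
      have hc0 : pvCut q r 0 = 0 := by unfold pvCut; omega
      have hc1 : pvCut q r (0 + 1) = (l.length : Int) := by unfold pvCut; omega
      rw [hc0, hc1]
      simp only [PySem.List.slice_zero_start]
      rw [PySem.List.slice_to _ hn0]
      simp
    · -- k ≥ 2 : peel off the first batch and recurse on the suffix
      have hk2 : (2 : Int) ≤ k := by omega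
      rw [pvSplitB]
      simp only [if_neg (show ¬ k ≤ 1 by omega)]
      set size : Int := -(PySem.Int.floordiv (-(l.length : Int)) k) with hsizedef
      have hsize : size = q + min 1 r := by
        rw [hsizedef, PySem.Int.neg_floordiv_neg_eq_iff_of_pos hkpos]
        rcases (show r = 0 ∨ 1 ≤ r by omega) with h | h
        · have hm : min (1 : Int) r = 0 := by omega
          rw [hm]
          constructor <;> nlinarith [hdm, hkpos]
        · have hm : min (1 : Int) r = 1 := by omega
          rw [hm]
          constructor <;> nlinarith [hdm, hrk, h]
      have hsize0 : 0 ≤ size := by rw [hsize]; omega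
      have hsizen : size ≤ (l.length : Int) := by
        rw [hsize]
        rcases (show q = 0 ∨ 1 ≤ q by omega) with h | h
        · have hkq : k * q = 0 := by rw [h]; ring
          omega
        · have hm1 : min (1 : Int) r ≤ 1 := min_le_left _ _
          nlinarith [hdm, hm1, mul_nonneg (show (0:Int) ≤ k - 2 by omega) hq0]
      have hdropeq : PySem.List.slice l (some size) none = l.drop size.toNat :=
        PySem.List.slice_from _ hsize0
      have hlen' : ((l.drop size.toNat).length : Int) = (l.length : Int) - size := by
        simp only [List.length_drop]
        omega
      set r' : Int := r - min 1 r with hr'def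
      have hr'b : 0 ≤ r' ∧ r' < k - 1 := by omega
      have hsum : (l.length : Int) - size = (k - 1) * q + r' := by
        rw [hsize, hr'def]; linear_combination -hdm
      have hbase' : PySem.Int.floordiv ((l.drop size.toNat).length : Int) (k - 1) = q := by
        rw [PySem.Int.floordiv_eq_ediv_of_pos (show (0:Int) < k - 1 by omega), hlen', hsum,
          add_comm, Int.add_mul_ediv_left _ _ (show (k:Int) - 1 ≠ 0 by omega),
          Int.ediv_eq_zero_of_lt hr'b.1 hr'b.2]
        omega
      have hrem' : PySem.Int.mod ((l.drop size.toNat).length : Int) (k - 1) = r' := by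
        rw [PySem.Int.mod_eq_emod_of_pos (show (0:Int) < k - 1 by omega), hlen', hsum,
          add_comm, Int.add_mul_emod_self_left]
        exact Int.emod_eq_of_lt hr'b.1 hr'b.2
      rw [hdropeq, ih (l.drop size.toNat) (k - 1) (by omega) (by omega), hbase', hrem']
      have hcutshift : ∀ i : Int, 0 ≤ i → pvCut q r' i + size = pvCut q r (i + 1) := by
        intro i hi
        unfold pvCut
        rw [hsize]
        have hmin : min i r' + min 1 r = min (i + 1) r := by omega
        linear_combination hmin
      -- head batch
      rw [PySem.List.pyRange_one_cons (show (0:Int) < k by omega)]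
      simp only [List.map_cons]
      rw [hbase, hrem]
      have hc0 : pvCut q r 0 = 0 := by unfold pvCut; omega
      have hc1 : pvCut q r (0 + 1) = size := by unfold pvCut; rw [hsize]; omega
      rw [hc0, hc1]
      simp only [PySem.List.slice_zero_start, List.singleton_append]
      congr 1
      -- tail batches: shift the range by one and the slices by size
      have hshift : PySem.List.pyRange (0 + 1) k 1
          = (PySem.List.pyRange 0 (k - 1) 1).map (fun i => i + 1) := by
        have h := pvRangeShift (k - 1).toNat 0 (k - 1) (by omega)
        rw [show (k : Int) - 1 + 1 = k by ring] at h
        exact h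
      rw [hshift, List.map_map]
      apply List.map_congr_left
      intro i hi
      have hi0 : 0 ≤ i := by
        have := PySem.List.mem_pyRange_one.mp hi
        omega
      have hcz : ∀ j : Int, 0 ≤ j → 0 ≤ pvCut q r' j := by
        intro j hj
        unfold pvCut
        have := mul_nonneg hj hq0
        omega
      simp only [Function.comp]
      rw [pvSliceShift l size _ _ hsize0 (hcz i hi0) (hcz (i + 1) (by omega))]
      rw [hcutshift i hi0, hcutshift (i + 1) (by omega)]

-- ===== VERDICT (by name: the statement is the Claim_ definition above) =====
theorem chunk_tables_spec : Claim_equal_chunk_tables := by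
  intro tables max_size _ hpre
  unfold Spec_chunk_tables chunk_tables chunk_tables_alt
  by_cases hnil : tables = []
  · subst hnil; simp
  · have hm : 0 < max_size := by
      rcases hpre with h | h
      · exact h
      · exact absurd h hnil
    have hnpos : 0 < (tables.length : Int) := by
      have : tables.length ≠ 0 := fun h => hnil (List.length_eq_zero_iff.mp h)
      omega
    have hfd : PySem.Int.floordiv (-(tables.length : Int)) max_size < 0 := by
      rw [PySem.Int.floordiv_lt_iff_lt_mul hm]
      nlinarith
    have hnb : 1 ≤ -(PySem.Int.floordiv (-(tables.length : Int)) max_size) := by omega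
    simp only [if_neg (show ¬ (tables.length : Int) = 0 by omega), if_neg hnil]
    set nb : Int := -(PySem.Int.floordiv (-(tables.length : Int)) max_size) with hnbdef
    have hrem0 : 0 ≤ PySem.Int.mod (tables.length : Int) nb := by
      rw [PySem.Int.mod_eq_emod_of_pos (by omega)]
      exact Int.emod_nonneg _ (by omega)
    have h0 : (0 : Int) = pvCut (PySem.Int.floordiv (tables.length : Int) nb)
        (PySem.Int.mod (tables.length : Int) nb) 0 := by
      unfold pvCut; omega
    rw [show (([] : List (List Int)), (0 : Int))
        = (([] : List (List Int)), pvCut (PySem.Int.floordiv (tables.length : Int) nb)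
            (PySem.Int.mod (tables.length : Int) nb) 0) by rw [← h0]]
    rw [pvLoopA tables _ _ nb.toNat nb 0 [] (by omega)]
    rw [pvSplitB_eq nb.toNat tables nb hnb (by omega)]
    simp
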